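-- pv_equiv track=rewrite | github.com/KKrzych09/pp1 | 99-FinalTest/zadanie4.py | ukryj
-- ===== SOURCE A (Python) =====
-- def ukryj(tekst):
--     result = ""
--     if len(tekst) >= 3:
--         for i in range(3):
--             result += tekst[i]
--         result += "*" * (len(tekst) - 3)
--         return result
--     else:
--         return "Tekst ma mniej niz 3 znaki"
-- ===== SOURCE B (Python) =====
-- def ukryj(tekst):
--     if len(tekst) < 3:
--         return "Tekst ma mniej niz 3 znaki"
--     buf = list(tekst)
--     i = len(buf) - 1
--     while i >= 3:
--         buf[i] = "*"
--         i -= 1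
--     return "".join(buf)
-- ===== Notes on version B (the rewrite author's own statement) =====
-- stated objective: alternative
-- what changed: Instead of A's two-phase construction (index loop copying the first three characters, then appending a repeated-asterisk string of length len-3), B converts the string to a mutable list once and overwrites positions len-1 down to 3 with the mask character in place via a backwards while loop, then joins the buffer.
import Mathlib
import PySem

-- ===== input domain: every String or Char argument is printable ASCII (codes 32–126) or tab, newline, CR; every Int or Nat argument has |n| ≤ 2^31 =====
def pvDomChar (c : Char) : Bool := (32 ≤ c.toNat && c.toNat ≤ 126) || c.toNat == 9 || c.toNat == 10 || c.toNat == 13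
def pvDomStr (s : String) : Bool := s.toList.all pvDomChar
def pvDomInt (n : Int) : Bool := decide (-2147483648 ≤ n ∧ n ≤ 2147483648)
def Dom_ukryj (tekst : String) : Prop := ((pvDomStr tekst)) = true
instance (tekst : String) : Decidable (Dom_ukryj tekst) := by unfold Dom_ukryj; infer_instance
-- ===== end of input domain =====

-- B replaces A's two-phase build (copy loop + appended '*'*(len-3)) with in-place masking of a
-- mutable character buffer walked backwards from the last index down to 3 (alternative decomposition).

-- ===== PORT A =====
-- tekst[i] is PySem.Str.pyGet?; under the guard the indices 0,1,2 are in range,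
-- so the (never-hit) none case contributes nothing (Option.toList).
def ukryj (tekst : String) : String :=
  let result : List Char := []
  if 3 ≤ PySem.Str.len tekst then
    let result := (PySem.List.pyRange 0 3 1).foldl
      (fun acc i => acc ++ (PySem.Str.pyGet? tekst i).toList) result
    let result := result ++ List.replicate (PySem.Str.len tekst - 3).toNat '*'
    String.mk result
  else "Tekst ma mniej niz 3 znaki"

-- ===== PORT B =====
-- transliteration of Source B's backwards while loop: buf[i] = '*'; i -= 1 while i >= 3
-- (i is always < len(buf) here, so buf[i] = '*' is List.set at i.toNat)
def ukryjLoop (buf : List Char) (i : Int) : List Char :=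
  if 3 ≤ i then ukryjLoop (buf.set i.toNat '*') (i - 1) else buf
termination_by i.toNat
decreasing_by omega

def ukryj_alt (tekst : String) : String :=
  if PySem.Str.len tekst < 3 then "Tekst ma mniej niz 3 znaki"
  else String.mk (ukryjLoop tekst.toList (PySem.Str.len tekst - 1))

-- ===== PRECONDITION & SPEC =====
def Spec_ukryj (tekst : String) (out : String) : Prop := out = ukryj_alt tekst
instance (tekst : String) (out : String) : Decidable (Spec_ukryj tekst out) := by unfold Spec_ukryj; infer_instance

-- ===== CLAIM =====
def Claim_equal_ukryj : Prop := ∀ (tekst : String), Dom_ukryj tekst → Spec_ukryj tekst (ukryj tekst)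

-- ===== LEMMAS AND PROOFS =====

theorem drop_set_self (l : List Char) (n : Nat) (a : Char) (h : n < l.length) :
    (l.set n a).drop n = a :: l.drop (n + 1) := by
  induction l generalizing n with
  | nil => simp at h
  | cons x xs ih =>
    cases n with
    | zero => simp
    | succ m =>
      simp only [List.set_cons_succ, List.drop_succ_cons]
      exact ih m (by simpa using h)

-- the loop turns positions 3..i into '*', leaving the rest of the buffer alone
theorem ukryjLoop_spec (buf : List Char) (i : Int) (h2 : 2 ≤ i)
    (hlt : i.toNat < buf.length) :
    ukryjLoop buf i
      = buf.take 3 ++ List.replicate (i.toNat - 2) '*' ++ buf.drop (i.toNat + 1) := by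
  suffices H : ∀ k (buf : List Char) (i : Int), i.toNat - 2 = k → 2 ≤ i →
      i.toNat < buf.length →
      ukryjLoop buf i
        = buf.take 3 ++ List.replicate (i.toNat - 2) '*' ++ buf.drop (i.toNat + 1) from
    H _ buf i rfl h2 hlt
  intro k
  induction k with
  | zero =>
    intro buf i hk h2 hlt
    have hi : i = 2 := by omega
    subst hi
    rw [ukryjLoop, if_neg (by omega)]
    simp [List.take_append_drop]
  | succ m ih =>
    intro buf i hk h2 hlt
    have h3 : 3 ≤ i := by omega
    rw [ukryjLoop, if_pos h3]
    rw [ih (buf.set i.toNat '*') (i - 1) (by omega) (by omega) (by simp; omega)]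
    have hn : (i - 1).toNat = i.toNat - 1 := by omega
    have h3n : 3 ≤ i.toNat := by omega
    rw [hn]
    have htake : (buf.set i.toNat '*').take 3 = buf.take 3 := by
      rw [List.take_set]
      exact List.set_eq_of_length_le (by simp [Nat.min_le_left]; omega)
    have hdrop : (buf.set i.toNat '*').drop (i.toNat - 1 + 1)
        = '*' :: buf.drop (i.toNat + 1) := by
      rw [show i.toNat - 1 + 1 = i.toNat from by omega]
      exact drop_set_self buf i.toNat '*' hlt
    rw [htake, hdrop,
      show i.toNat - 1 - 2 = m from by omega,
      show i.toNat - 2 = m + 1 from by omega,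
      List.replicate_succ']
    simp [List.append_assoc]

-- ===== VERDICT =====
theorem ukryj_spec : Claim_equal_ukryj := by
  intro tekst _
  show ukryj tekst = ukryj_alt tekst
  unfold ukryj ukryj_alt
  by_cases h : 3 ≤ PySem.Str.len tekst
  · rw [if_pos h, if_neg (by omega)]
    have hL : PySem.Str.len tekst = (tekst.toList.length : Int) := PySem.Str.len_eq tekst
    have hlen : 3 ≤ tekst.toList.length := by omega
    obtain ⟨a, b, c, rest, hl⟩ :
        ∃ a b c rest, tekst.toList = a :: b :: c :: rest := by
      match hm : tekst.toList, hlen with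
      | a :: b :: c :: rest, _ => exact ⟨a, b, c, rest, rfl⟩
    rw [show PySem.List.pyRange 0 3 1 = [0, 1, 2] from by decide]
    simp only [List.foldl_cons, List.foldl_nil, List.nil_append]
    have g0 : PySem.Str.pyGet? tekst 0 = some a := by
      rw [show (0:Int) = ((0:Nat):Int) from rfl, PySem.Str.pyGet?_natCast, hl]; rfl
    have g1 : PySem.Str.pyGet? tekst 1 = some b := by
      rw [show (1:Int) = ((1:Nat):Int) from rfl, PySem.Str.pyGet?_natCast, hl]; rfl
    have g2 : PySem.Str.pyGet? tekst 2 = some c := by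
      rw [show (2:Int) = ((2:Nat):Int) from rfl, PySem.Str.pyGet?_natCast, hl]; rfl
    rw [g0, g1, g2, hL, hl]
    have hlen' : (a :: b :: c :: rest).length = rest.length + 3 := by simp
    rw [ukryjLoop_spec (a :: b :: c :: rest)
        ((((a :: b :: c :: rest).length : Int)) - 1) (by simp; omega) (by simp)]
    rw [hlen']
    rw [show ((((rest.length + 3 : Nat) : Int)) - 1).toNat = rest.length + 2 from by omega]
    simp only [Option.toList_some]
    rw [show rest.length + 2 - 2 = rest.length from by omega,
      show ((rest.length + 3 : Nat) : Int) - 3 = (rest.length : Int) from by push_cast; ring]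
    simp [List.drop_succ_cons, List.drop_length, Int.toNat_natCast]
  · rw [if_neg h, if_pos (by omega)]
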